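-- pv_equiv track=rewrite | github.com/marandmath/programming_challenges | Advent of Code Programs/2015/Day 5/Day 5 Part I.py | double_letter
-- ===== SOURCE A (Python) =====
-- def double_letter(letters):
--     """A function that checks the letters of a word to find any doubles
--     and if any forbidden sequences are in that word"""
--     forbidden_sequences = ['ab', 'cd', 'pq', 'xy']
--     flag = 0
--     for i in range(len(letters)-1):
--         check_double = letters[i] == letters[i+1]
--         check_forbidden = letters[i]+letters[i+1] in forbidden_sequences
--         if check_double and not check_forbidden:
--             flag = 1
--         else:
--             continue
--     return flag
-- ===== SOURCE B (Python) =====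
-- def double_letter(letters):
--     """Collapse the string into maximal runs of equal characters; a double
--     letter exists iff some run has length >= 2.  The forbidden sequences of A
--     ('ab','cd','pq','xy') are all distinct-letter pairs, so they can never be
--     a double and are irrelevant to the result."""
--     runs = []  # list of (char, run_length), most recent run last
--     for ch in letters:
--         if runs and runs[-1][0] == ch:
--             runs[-1] = (ch, runs[-1][1] + 1)
--         else:
--             runs.append((ch, 1))
--     return 1 if any(n >= 2 for _, n in runs) else 0
-- ===== Notes on version B (the rewrite author's own statement) =====
-- stated objective: idiomatic
-- what changed: B drops the forbidden-sequence membership test entirely (those pairs are distinct-letter pairs and can never be doubles, proved in Lean) and collapses the string into maximal runs of equal characters, answering 1 iff some run has length >= 2, instead of A's indexed scan over adjacent pairs with a flag.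
import Mathlib
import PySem

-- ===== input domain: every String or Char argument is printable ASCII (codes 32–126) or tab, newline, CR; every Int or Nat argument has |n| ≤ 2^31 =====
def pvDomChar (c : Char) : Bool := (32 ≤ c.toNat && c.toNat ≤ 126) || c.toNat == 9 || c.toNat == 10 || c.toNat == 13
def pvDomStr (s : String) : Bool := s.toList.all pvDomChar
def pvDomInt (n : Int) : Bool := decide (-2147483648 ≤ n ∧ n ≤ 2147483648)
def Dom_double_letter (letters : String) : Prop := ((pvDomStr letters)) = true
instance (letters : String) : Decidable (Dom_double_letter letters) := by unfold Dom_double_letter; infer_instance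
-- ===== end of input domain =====

-- B replaces A's indexed adjacent-pair scan (whose forbidden-sequence test can never fire
-- on a double, since the forbidden pairs are distinct-letter pairs) by a collapse of the
-- string into maximal runs of equal characters, answering 1 iff some run has length ≥ 2
-- (objective: idiomatic).

-- ===== PORT A =====
def double_letter (letters : String) : Int :=
  let forbidden_sequences : List String := ["ab", "cd", "pq", "xy"]
  let cs := letters.toList
  (PySem.List.pyRange 0 ((cs.length : Int) - 1) 1).foldl (fun flag i =>
    -- i ranges over [0, len-1), so both indexed accesses succeed; the fallback arm is unreachable
    match PySem.List.pyGet? cs i, PySem.List.pyGet? cs (i + 1) with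
    | some a, some b =>
      let check_double := a == b
      let check_forbidden := forbidden_sequences.contains (String.ofList [a, b])
      if check_double && !check_forbidden then 1 else flag
    | _, _ => flag) 0

-- ===== PORT B =====
-- the body of Source B's for-loop: extend the current last run or open a new one
-- (runs is kept most-recent-run-first: Python appends at the end and mutates runs[-1];
-- the `any` over runs is order-independent)
def runStep (runs : List (Char × Int)) (ch : Char) : List (Char × Int) :=
  match runs with
  | (c, n) :: rest => if c == ch then (ch, n + 1) :: rest else (ch, 1) :: (c, n) :: rest
  | [] => [(ch, 1)]

def double_letter_alt (letters : String) : Int :=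
  let runs := letters.toList.foldl runStep []
  if runs.any (fun p => decide (p.2 ≥ 2)) then 1 else 0

-- ===== PRECONDITION & SPEC =====
def Spec_double_letter (letters : String) (out : Int) : Prop := out = double_letter_alt letters
instance (letters : String) (out : Int) : Decidable (Spec_double_letter letters out) := by unfold Spec_double_letter; infer_instance

-- ===== CLAIM (what is proved, stated in full; the proofs are below) =====
def Claim_equal_double_letter : Prop := ∀ (letters : String), Dom_double_letter letters → Spec_double_letter letters (double_letter letters)

-- ===== LEMMAS AND PROOFS =====

-- reference predicate: the string has two equal adjacent characters
def hasDouble : List Char → Bool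
  | a :: b :: t => a == b || hasDouble (b :: t)
  | _ => false

-- A's loop-body condition as a function of the Int index
def pA (cs : List Char) (i : Int) : Bool :=
  match PySem.List.pyGet? cs i, PySem.List.pyGet? cs (i + 1) with
  | some a, some b => a == b && !(["ab", "cd", "pq", "xy"].contains (String.ofList [a, b]))
  | _, _ => false

-- the same condition with a Nat index
def qA (cs : List Char) (k : Nat) : Bool :=
  match cs[k]?, cs[k + 1]? with
  | some a, some b => a == b && !(["ab", "cd", "pq", "xy"].contains (String.ofList [a, b]))
  | _, _ => false

-- a double "cc" is never one of the forbidden sequences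
theorem forb_self (a : Char) :
    (["ab", "cd", "pq", "xy"].contains (String.ofList [a, a])) = false := by
  have key : ∀ s ∈ (["ab", "cd", "pq", "xy"] : List String), String.ofList [a, a] ≠ s := by
    intro s hs h
    have h2 := congrArg String.toList h
    rw [String.toList_ofList] at h2
    fin_cases hs <;> simp_all <;> (obtain ⟨rfl, hh⟩ := h2; exact absurd hh (by decide))
  simpa using key

theorem qA_zero (a b : Char) (t : List Char) : qA (a :: b :: t) 0 = (a == b) := by
  have e : qA (a :: b :: t) 0
      = (a == b && !(["ab", "cd", "pq", "xy"].contains (String.ofList [a, b]))) := rfl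
  rw [e]
  by_cases h : a = b
  · subst h; rw [forb_self]; simp
  · simp [h]

theorem qA_succ (a : Char) (cs : List Char) (k : Nat) : qA (a :: cs) (k + 1) = qA cs k := rfl

theorem pA_natCast (cs : List Char) (k : Nat) : pA cs ((0 : Int) + (k : Int)) = qA cs k := by
  have h1 : ((0 : Int) + (k : Int)) = ((k : Nat) : Int) := by omega
  have h2 : (((k : Nat) : Int) + 1) = (((k + 1 : Nat)) : Int) := by omega
  simp only [pA, qA, h1, h2, PySem.List.pyGet?_natCast]

-- setting a flag to 1 whenever p holds computes `any p`
theorem foldl_flag (p : Int → Bool) (l : List Int) (a : Int) :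
    l.foldl (fun flag i => if p i then 1 else flag) a = if l.any p then 1 else a := by
  induction l generalizing a with
  | nil => simp
  | cons x xs ih =>
    simp only [List.foldl_cons, List.any_cons, ih]
    by_cases hx : p x <;> by_cases hxs : xs.any p <;> simp [hx, hxs]

theorem any_range_qA (cs : List Char) :
    (List.range (cs.length - 1)).any (qA cs) = hasDouble cs := by
  induction cs with
  | nil => simp [hasDouble]
  | cons a t ih =>
    match t with
    | [] => simp [hasDouble]
    | b :: t' =>
      have hlen : (a :: b :: t').length - 1 = ((b :: t').length - 1) + 1 := by simp
      rw [hlen, List.range_succ_eq_map, List.any_cons, List.any_map]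
      rw [show (List.range ((b :: t').length - 1)).any (qA (a :: b :: t') ∘ Nat.succ)
            = (List.range ((b :: t').length - 1)).any (qA (b :: t'))
          from List.any_congr rfl (fun k => qA_succ a (b :: t') k)]
      rw [ih, qA_zero]
      rfl

-- A computes: 1 iff there are two equal adjacent characters
theorem A_eq (s : String) :
    double_letter s = if hasDouble s.toList then 1 else 0 := by
  simp only [double_letter]
  have hstep : (fun (flag : Int) (i : Int) =>
      match PySem.List.pyGet? s.toList i, PySem.List.pyGet? s.toList (i + 1) with
      | some a, some b =>
        let check_double := a == b
        let check_forbidden := (["ab", "cd", "pq", "xy"] : List String).contains (String.ofList [a, b])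
        if check_double && !check_forbidden then (1 : Int) else flag
      | _, _ => flag)
      = (fun (flag : Int) (i : Int) => if pA s.toList i then 1 else flag) := by
    funext flag i
    unfold pA
    rcases h1 : PySem.List.pyGet? s.toList i with _ | a <;>
      rcases h2 : PySem.List.pyGet? s.toList (i + 1) with _ | b <;> simp
  rw [hstep, foldl_flag (pA s.toList)]
  have hany : (PySem.List.pyRange 0 ((s.toList.length : Int) - 1) 1).any (pA s.toList)
      = hasDouble s.toList := by
    rw [PySem.List.pyRange_one, List.any_map]
    have hn : (((s.toList.length : Int) - 1) - 0).toNat = s.toList.length - 1 := by omega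
    rw [hn]
    rw [show (List.range (s.toList.length - 1)).any (pA s.toList ∘ fun k => (0 : Int) + ↑k)
          = (List.range (s.toList.length - 1)).any (qA s.toList)
        from List.any_congr rfl (fun k => pA_natCast s.toList k)]
    rw [any_range_qA]
  rw [hany]

-- B-side invariant: running the collapse from a non-empty runs stack whose top count is ≥ 1
theorem B_inv (cs : List Char) :
    ∀ (c : Char) (n : Int) (rest : List (Char × Int)), 1 ≤ n →
    ((cs.foldl runStep ((c, n) :: rest)).any (fun p => decide (p.2 ≥ 2)))
      = (((c, n) :: rest).any (fun p => decide (p.2 ≥ 2)) || hasDouble (c :: cs)) := by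
  induction cs with
  | nil => intro c n rest _; simp [hasDouble]
  | cons d t ih =>
    intro c n rest hn
    simp only [List.foldl_cons, runStep]
    by_cases h : c = d
    · subst h
      simp only [beq_self_eq_true, if_pos]
      rw [ih c (n + 1) rest (by omega)]
      have h2 : decide ((n + 1 : Int) ≥ 2) = true := by simp; omega
      simp [hasDouble, h2]
    · have hb : (c == d) = false := by simp [h]
      simp only [hb, Bool.false_eq_true, ite_false]
      rw [ih d 1 ((c, n) :: rest) le_rfl]
      simp [hasDouble, hb, Bool.or_assoc]

theorem B_eq (s : String) :
    double_letter_alt s = if hasDouble s.toList then 1 else 0 := by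
  unfold double_letter_alt
  match h : s.toList with
  | [] => simp [hasDouble]
  | a :: t =>
    simp only [List.foldl_cons]
    have hrs : runStep [] a = [(a, 1)] := rfl
    simp only [hrs]
    simp only [B_inv t a 1 [] le_rfl]
    simp

-- ===== VERDICT (by name: the statement is the Claim_ definition above) =====
theorem double_letter_spec : Claim_equal_double_letter := by
  intro letters _
  unfold Spec_double_letter
  rw [A_eq, B_eq]
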